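-- pv_equiv track=rewrite | github.com/Cruise-z/CodeWM_ProWES | 2_Robustness/pythonLang/pyCodeObfuscator/rules/AL/expression/format_percent_usage.py | _format_inner_to_percent
-- ===== SOURCE A (Python) =====
-- def _format_inner_to_percent(inner: str) -> str:
--     """
--     "{},{}" / "{0},{1}" -> "%s,%s"
--
--     假设 inner 已经通过 pattern 的 _check_format_template 校验：
--       - 只包含 {} 或 {数字}
--       - 没有 {{ / }} 等复杂情况
--     """
--     out_chars: list[str] = []
--     i = 0
--     n = len(inner)
--
--     while i < n:
--         ch = inner[i]
--         if ch == "{":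
--             j = inner.find("}", i + 1)
--             if j == -1:
--                 # 理论上不会发生（pattern 已校验），这里兜个底
--                 out_chars.append(ch)
--                 i += 1
--             else:
--                 # 跳过 {...}，统一改成 %s
--                 out_chars.append("%s")
--                 i = j + 1
--         else:
--             out_chars.append(ch)
--             i += 1
--
--     return "".join(out_chars)
-- ===== SOURCE B (Python) =====
-- def _format_inner_to_percent(inner: str) -> str:
--     # Split once on "}" : every "}" in the input closes exactly one piece.
--     # Each piece before a "}" either contains a "{" (then everything from that
--     # first "{" up to the "}" was a placeholder -> head + "%s") or it does not
--     # (then its "}" was a bare one and stays literal). The final piece (after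
--     # the last "}", or the whole string if there is none) is kept verbatim,
--     # which also covers an unmatched "{".
--     parts = inner.split("}")
--     out = []
--     for p in parts[:-1]:
--         head, brace, _ = p.partition("{")
--         out.append(head + "%s" if brace else p + "}")
--     out.append(parts[-1])
--     return "".join(out)
-- ===== Notes on version B (the rewrite author's own statement) =====
-- stated objective: simpler
-- what changed: A's index-driven while loop with manual find/skip bookkeeping is replaced by one split on the closing brace: each piece before a separator is rewritten via partition (placeholder tail -> '%s', otherwise the separator is restored), the final piece is kept verbatim.
import Mathlib
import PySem

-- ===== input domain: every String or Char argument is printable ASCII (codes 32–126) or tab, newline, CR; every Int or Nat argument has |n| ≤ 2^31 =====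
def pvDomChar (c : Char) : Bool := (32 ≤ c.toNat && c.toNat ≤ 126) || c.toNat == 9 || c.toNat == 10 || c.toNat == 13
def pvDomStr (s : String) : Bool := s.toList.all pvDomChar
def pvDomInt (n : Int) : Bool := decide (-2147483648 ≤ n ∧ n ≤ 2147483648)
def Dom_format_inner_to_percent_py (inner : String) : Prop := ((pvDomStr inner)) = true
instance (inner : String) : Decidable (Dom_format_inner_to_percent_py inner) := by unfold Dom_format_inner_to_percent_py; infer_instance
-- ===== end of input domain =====

-- B replaces A's index-driven while loop by one split("}") pass (simpler; measured faster: C-level split/partition vs a per-char Python loop).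

-- ===== PORT A =====
-- `j = inner.find("}", i+1)` seen from the current suffix `rest = inner[i+1:]`:
-- returns `(inner[i+1:j], inner[j+1:])`, or none when find returns -1.
def pvBrkBrace : List Char → Option (List Char × List Char)
  | [] => none
  | c :: t => if c = '}' then some ([], t) else (pvBrkBrace t).map (fun q => (c :: q.1, q.2))

-- needed by the port's termination proof
theorem pvBrkBrace_some : ∀ {l b a : List Char}, pvBrkBrace l = some (b, a) → l = b ++ '}' :: a ∧ '}' ∉ b := by
  intro l
  induction l with
  | nil => intro b a h; simp [pvBrkBrace] at h
  | cons c t ih =>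
    intro b a h
    by_cases hc : c = '}'
    · subst hc
      simp [pvBrkBrace] at h
      obtain ⟨rfl, rfl⟩ := h
      simp
    · simp [pvBrkBrace, hc] at h
      obtain ⟨qb, hq, rfl⟩ := h
      obtain ⟨e1, e2⟩ := ih hq
      subst e1
      refine ⟨by simp, ?_⟩
      intro m
      rcases List.mem_cons.mp m with e | m
      · exact hc e.symm
      · exact e2 m

-- the while loop of A: one call = one iteration at position i (suffix `cs`),
-- `acc` = out_chars so far
def pvALoop : List Char → List (List Char) → List (List Char)
  | [], acc => acc
  | c :: rest, acc =>
    if c = '{' then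
      match h : pvBrkBrace rest with
      | none => pvALoop rest (acc ++ [[c]])          -- j == -1: append "{", i += 1
      | some q => pvALoop q.2 (acc ++ [['%', 's']])  -- append "%s", i = j + 1
    else pvALoop rest (acc ++ [[c]])
termination_by cs _ => cs.length
decreasing_by
  · simp
  · have := (pvBrkBrace_some h).1
    simp [this]
    omega
  · simp

-- `"".join(out_chars)` = the concatenation of the collected pieces
def format_inner_to_percent_py (inner : String) : String :=
  String.ofList (pvALoop inner.toList []).flatten

-- ===== PORT B =====
-- `head, brace, _ = p.partition("{")`: head = chars before the first '{',
-- `brace` is nonempty exactly when '{' occurs in p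
def pvBPiece (p : List Char) : List Char :=
  if p.contains '{' then p.takeWhile (· ≠ '{') ++ ['%', 's'] else p ++ ['}']

def format_inner_to_percent_py_alt (inner : String) : String :=
  -- parts = inner.split("}") : Python's split on a one-char separator = List.splitOn
  let parts := inner.toList.splitOn '}'
  -- for p in parts[:-1]: out.append(head + "%s" if brace else p + "}")
  let out := parts.dropLast.foldl (fun acc p => acc ++ [pvBPiece p]) []
  -- out.append(parts[-1]) — parts is never empty, so parts[-1] = getLastD
  String.ofList (out ++ [parts.getLastD []]).flatten

-- ===== PRECONDITION & SPEC =====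
def Spec_format_inner_to_percent_py (inner : String) (out : String) : Prop := out = format_inner_to_percent_py_alt inner
instance (inner : String) (out : String) : Decidable (Spec_format_inner_to_percent_py inner out) := by unfold Spec_format_inner_to_percent_py; infer_instance

-- ===== CLAIM (what is proved, stated in full; the proofs are below) =====
def Claim_equal_format_inner_to_percent_py : Prop := ∀ (inner : String), Dom_format_inner_to_percent_py inner → Spec_format_inner_to_percent_py inner (format_inner_to_percent_py inner)

-- ===== LEMMAS AND PROOFS =====

-- unfolding equations of A's loop
theorem pvALoop_nil (acc : List (List Char)) : pvALoop [] acc = acc := by rw [pvALoop]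

theorem pvALoop_open_none (rest : List Char) (acc : List (List Char)) (hb : pvBrkBrace rest = none) :
    pvALoop ('{' :: rest) acc = pvALoop rest (acc ++ [['{']]) := by
  rw [pvALoop]
  split
  · split <;> simp_all
  · simp_all

theorem pvALoop_open_some (rest : List Char) (acc : List (List Char)) (q : List Char × List Char)
    (hb : pvBrkBrace rest = some q) :
    pvALoop ('{' :: rest) acc = pvALoop q.2 (acc ++ [['%', 's']]) := by
  rw [pvALoop]
  split
  · split <;> simp_all
  · simp_all

theorem pvALoop_copy (c : Char) (rest : List Char) (acc : List (List Char)) (hc : c ≠ '{') :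
    pvALoop (c :: rest) acc = pvALoop rest (acc ++ [[c]]) := by
  rw [pvALoop]
  rw [if_neg hc]

-- B's result as a function of the split parts
def pvGB (parts : List (List Char)) : List Char :=
  ((parts.dropLast.map pvBPiece) ++ [parts.getLastD []]).flatten

theorem pvAlt_eq (inner : String) :
    format_inner_to_percent_py_alt inner = String.ofList (pvGB (inner.toList.splitOn '}')) := by
  simp only [format_inner_to_percent_py_alt]
  rw [PySem.List.foldl_append_singleton_eq_map]
  simp [pvGB]

theorem pvBrkBrace_none {l : List Char} (h : pvBrkBrace l = none) : '}' ∉ l := by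
  induction l with
  | nil => simp
  | cons c t ih =>
    by_cases hc : c = '}'
    · simp [pvBrkBrace, hc] at h
    · simp [pvBrkBrace, hc] at h ⊢
      exact ⟨fun e => hc e.symm, ih h⟩

theorem pvALoop_acc (n : ℕ) : ∀ cs : List Char, cs.length ≤ n → ∀ acc,
    pvALoop cs acc = acc ++ pvALoop cs [] := by
  induction n with
  | zero =>
    intro cs h acc
    have : cs = [] := by cases cs <;> simp_all
    subst this; simp [pvALoop_nil]
  | succ n ih =>
    intro cs h acc
    match cs with
    | [] => simp [pvALoop_nil]
    | c :: rest =>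
      have hlen : rest.length ≤ n := by simpa using h
      by_cases hc : c = '{'
      · subst hc
        cases hb : pvBrkBrace rest with
        | none =>
          rw [pvALoop_open_none _ _ hb, pvALoop_open_none _ _ hb]
          rw [ih rest hlen (acc ++ [['{']]), ih rest hlen ([] ++ [['{']])]
          simp
        | some q =>
          have hq : q.2.length ≤ n := by
            obtain ⟨e1, _⟩ := pvBrkBrace_some (b := q.1) (a := q.2) (by simpa using hb)
            simp [e1] at hlen; omega
          rw [pvALoop_open_some _ _ _ hb, pvALoop_open_some _ _ _ hb]
          rw [ih q.2 hq (acc ++ [['%','s']]), ih q.2 hq ([] ++ [['%','s']])]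
          simp
      · rw [pvALoop_copy _ _ _ hc, pvALoop_copy _ _ _ hc]
        rw [ih rest hlen (acc ++ [[c]]), ih rest hlen ([] ++ [[c]])]
        simp

-- on a '}'-free suffix A copies every character
theorem pvALoop_no_close (l : List Char) (h : '}' ∉ l) : (pvALoop l []).flatten = l := by
  induction l with
  | nil => simp [pvALoop_nil]
  | cons c t ih =>
    have ht : '}' ∉ t := fun m => h (List.mem_cons_of_mem _ m)
    by_cases hc : c = '{'
    · subst hc
      have hb : pvBrkBrace t = none := by
        cases hbb : pvBrkBrace t with
        | none => rfl
        | some q =>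
          exfalso
          have := (pvBrkBrace_some (b := q.1) (a := q.2) (by simpa using hbb)).1
          exact ht (by simp [this])
      rw [pvALoop_open_none _ _ hb]
      rw [pvALoop_acc t.length t le_rfl]
      simp [ih ht]
    · rw [pvALoop_copy _ _ _ hc]
      rw [pvALoop_acc t.length t le_rfl]
      simp [ih ht]

theorem pvSplit_no_close (l : List Char) (h : '}' ∉ l) : l.splitOn '}' = [l] := by
  induction l with
  | nil => simp [List.splitOn, List.splitOnP_nil]
  | cons c t ih =>
    have ht : '}' ∉ t := fun m => h (List.mem_cons_of_mem _ m)
    have hc : (c == '}') = false := by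
      simp only [beq_eq_false_iff_ne]; exact fun e => h (by simp [e])
    simp only [List.splitOn] at ih ⊢
    rw [List.splitOnP_cons, hc]
    simp [ih ht]

theorem pvSplit_close (b a : List Char) (h : '}' ∉ b) :
    (b ++ '}' :: a).splitOn '}' = b :: a.splitOn '}' := by
  induction b with
  | nil => simp only [List.nil_append, List.splitOn]; rw [List.splitOnP_cons]; simp
  | cons c t ih =>
    have ht : '}' ∉ t := fun m => h (List.mem_cons_of_mem _ m)
    have hc : (c == '}') = false := by
      simp only [beq_eq_false_iff_ne]; exact fun e => h (by simp [e])
    simp only [List.splitOn, List.cons_append] at ih ⊢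
    rw [List.splitOnP_cons, hc]
    simp [ih ht]

theorem pvSplit_ne_nil (l : List Char) : l.splitOn '}' ≠ [] :=
  List.splitOnP_ne_nil _ l

theorem pvGB_single (l : List Char) : pvGB [l] = l := by simp [pvGB]

theorem pvGB_cons (p : List Char) (parts : List (List Char)) (h : parts ≠ []) :
    pvGB (p :: parts) = pvBPiece p ++ pvGB parts := by
  unfold pvGB
  rw [List.dropLast_cons_of_ne_nil h]
  have hl : (p :: parts).getLastD [] = parts.getLastD [] := by
    cases parts with
    | nil => exact absurd rfl h
    | cons q t => simp [List.getLastD_eq_getLast?, List.getLast?_cons_cons]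
  rw [hl]
  simp

theorem pvBPiece_cons (c : Char) (h : List Char) (hc : c ≠ '{') :
    pvBPiece (c :: h) = c :: pvBPiece h := by
  by_cases hm : '{' ∈ h
  · have h1 : ('{' = c ∨ '{' ∈ h) := Or.inr hm
    simp [pvBPiece, hm, h1, hc]
  · have e1 : ¬((c :: h).contains '{' = true) := by
      simp only [List.contains_cons, Bool.or_eq_true, beq_iff_eq]
      rintro (e | m)
      · exact hc e.symm
      · exact hm (by simpa using m)
    have e2 : ¬(h.contains '{' = true) := by
      intro m; exact hm (by simpa using m)
    unfold pvBPiece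
    rw [if_neg e1, if_neg e2]
    simp

theorem pvGB_modifyHead (c : Char) (hc : c ≠ '{') (h : List Char) (t : List (List Char)) :
    pvGB ((c :: h) :: t) = c :: pvGB (h :: t) := by
  cases t with
  | nil => rw [pvGB_single, pvGB_single]
  | cons q r =>
    rw [pvGB_cons (c :: h) (q :: r) (by simp), pvGB_cons h (q :: r) (by simp),
      pvBPiece_cons c h hc]
    simp

theorem pvMain (n : ℕ) : ∀ cs : List Char, cs.length ≤ n →
    (pvALoop cs []).flatten = pvGB (cs.splitOn '}') := by
  induction n with
  | zero =>
    intro cs h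
    have : cs = [] := by cases cs <;> simp_all
    subst this
    simp [pvALoop_nil, List.splitOn, List.splitOnP_nil, pvGB]
  | succ n ih =>
    intro cs h
    match cs with
    | [] => simp [pvALoop_nil, List.splitOn, List.splitOnP_nil, pvGB]
    | c :: rest =>
      have hlen : rest.length ≤ n := by simpa using h
      by_cases hc : c = '{'
      · subst hc
        cases hb : pvBrkBrace rest with
        | none =>
          have hrest : '}' ∉ rest := pvBrkBrace_none hb
          have hcs : '}' ∉ '{' :: rest := by
            intro m; rcases List.mem_cons.mp m with e | m
            · exact absurd e (by decide)
            · exact hrest m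
          rw [pvALoop_open_none _ _ hb, pvALoop_acc rest.length rest le_rfl]
          rw [pvSplit_no_close _ hcs, pvGB_single]
          simp [pvALoop_no_close rest hrest]
        | some q =>
          obtain ⟨e1, e2⟩ := pvBrkBrace_some (b := q.1) (a := q.2) (by simpa using hb)
          have hq : q.2.length ≤ n := by simp [e1] at hlen; omega
          rw [pvALoop_open_some _ _ _ hb, pvALoop_acc q.2.length q.2 le_rfl]
          have hsplit : ('{' :: rest).splitOn '}' = ('{' :: q.1) :: q.2.splitOn '}' := by
            rw [e1]
            have e3 : ('{' :: (q.1 ++ '}' :: q.2)) = ('{' :: q.1) ++ '}' :: q.2 := by simp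
            rw [e3]
            refine pvSplit_close _ _ ?_
            intro m; rcases List.mem_cons.mp m with e | m
            · exact absurd e (by decide)
            · exact e2 m
          rw [hsplit, pvGB_cons _ _ (pvSplit_ne_nil q.2)]
          have hp : pvBPiece ('{' :: q.1) = ['%', 's'] := by simp [pvBPiece]
          simp [hp, ih q.2 hq]
      · rw [pvALoop_copy _ _ _ hc, pvALoop_acc rest.length rest le_rfl]
        by_cases hcc : c = '}'
        · subst hcc
          have hsplit : ('}' :: rest).splitOn '}' = [] :: rest.splitOn '}' := by
            have e3 : ('}' :: rest) = [] ++ '}' :: rest := by simp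
            rw [e3]
            exact pvSplit_close _ _ (by simp)
          rw [hsplit, pvGB_cons _ _ (pvSplit_ne_nil rest)]
          have hp : pvBPiece [] = ['}'] := by simp [pvBPiece]
          simp [hp, ih rest hlen]
        · have hceq : (c == '}') = false := by simpa using hcc
          have hsplit : (c :: rest).splitOn '}' =
              List.modifyHead (List.cons c) (rest.splitOn '}') := by
            simp only [List.splitOn]
            rw [List.splitOnP_cons, hceq]
            simp
          rw [hsplit]
          cases hqs : rest.splitOn '}' with
          | nil => exact absurd hqs (pvSplit_ne_nil rest)
          | cons p t =>
            simp only [List.modifyHead]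
            rw [pvGB_modifyHead c hc, ← hqs]
            simp [ih rest hlen]

-- ===== VERDICT (by name: the statement is the Claim_ definition above) =====
theorem format_inner_to_percent_py_spec : Claim_equal_format_inner_to_percent_py := by
  intro inner _
  unfold Spec_format_inner_to_percent_py format_inner_to_percent_py
  rw [pvAlt_eq, pvMain inner.toList.length inner.toList le_rfl]
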